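-- pv_equiv track=rewrite | github.com/wbshobhit1/Python3.7 | code.py | awseomeSort
-- ===== SOURCE A (Python) =====
-- def awseomeSort (N, arr):
--     arrev = []
--     arrodd = []
--     n= len(arr)
--     for i in range (0,n):
--         if arr[i] % 2 != 0:
--             arrodd.append(arr[i])
--             continue
--         else:
--             arrev.append(arr[i])
--             continue
--     arrdiv = []
--     arrnodiv = []
--     for j in range (0,len(arrev)):
--         if arrev[j] % 5 == 0:
--             arrdiv.append(arrev[j])
--             continue
--         else:
--             arrnodiv.append(arrev[j])
--
--     arrdiv.sort(reverse=True)
--     list1 = arrdiv + arrnodiv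
--     list2 = list1 + arrodd
--     return list2
-- ===== SOURCE B (Python) =====
-- def awseomeSort(N, arr):
--     def g(x):
--         if x % 2 != 0:
--             return 2
--         return 0 if x % 5 == 0 else 1
--     return sorted(arr, key=lambda x: (g(x), -x if g(x) == 0 else 0))
-- ===== Notes on version B (the rewrite author's own statement) =====
-- stated objective: simpler
-- what changed: A's two partition loops, in-place reverse sort of one group and two concatenations are replaced by a single stable sorted() call with a tuple key (group rank, -x within the divisible-by-10 group), relying on sort stability to keep the other groups in original order.
import Mathlib
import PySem

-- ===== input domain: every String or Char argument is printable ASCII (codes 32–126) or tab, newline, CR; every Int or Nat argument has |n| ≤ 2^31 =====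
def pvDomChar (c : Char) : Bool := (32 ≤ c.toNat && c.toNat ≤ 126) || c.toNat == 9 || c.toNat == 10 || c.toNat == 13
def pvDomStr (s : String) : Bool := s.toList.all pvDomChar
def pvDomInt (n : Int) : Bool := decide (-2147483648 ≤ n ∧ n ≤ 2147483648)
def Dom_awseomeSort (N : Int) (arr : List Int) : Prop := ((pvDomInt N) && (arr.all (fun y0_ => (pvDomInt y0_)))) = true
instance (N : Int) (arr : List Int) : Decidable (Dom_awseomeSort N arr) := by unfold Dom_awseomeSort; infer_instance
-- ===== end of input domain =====

-- B replaces A's two partition loops + in-place sort + concatenations by one stable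
-- keyed sort (objective: simpler).

-- ===== PORT A =====
-- arr[i] / arrev[j] are read with pyGetD (default 0): the loop index is always in range.
def awseomeSort (N : Int) (arr : List Int) : List Int :=
  let n := PySem.List.len arr
  let s1 := (PySem.List.pyRange 0 n).foldl
    (fun (s : List Int × List Int) i =>
      if PySem.Int.mod (PySem.List.pyGetD arr i 0) 2 ≠ 0 then
        (s.1, s.2 ++ [PySem.List.pyGetD arr i 0])
      else
        (s.1 ++ [PySem.List.pyGetD arr i 0], s.2)) ([], [])
  let arrev := s1.1
  let arrodd := s1.2
  let s2 := (PySem.List.pyRange 0 (PySem.List.len arrev)).foldl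
    (fun (s : List Int × List Int) j =>
      if PySem.Int.mod (PySem.List.pyGetD arrev j 0) 5 = 0 then
        (s.1 ++ [PySem.List.pyGetD arrev j 0], s.2)
      else
        (s.1, s.2 ++ [PySem.List.pyGetD arrev j 0])) ([], [])
  let arrdiv := PySem.List.sorted s2.1 (fun x => x) true
  let list1 := arrdiv ++ s2.2
  let list2 := list1 ++ arrodd
  list2

-- ===== PORT B =====
def pvG (x : Int) : Int :=
  if PySem.Int.mod x 2 ≠ 0 then 2
  else if PySem.Int.mod x 5 = 0 then 0 else 1

def awseomeSort_alt (N : Int) (arr : List Int) : List Int :=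
  PySem.List.sorted2 arr pvG (fun x => if pvG x = 0 then -x else 0) false

-- ===== PRECONDITION & SPEC =====
def Spec_awseomeSort (N : Int) (arr : List Int) (out : List Int) : Prop := out = awseomeSort_alt N arr
instance (N : Int) (arr : List Int) (out : List Int) : Decidable (Spec_awseomeSort N arr out) := by unfold Spec_awseomeSort; infer_instance

-- ===== CLAIM (what is proved, stated in full; the proofs are below) =====
def Claim_equal_awseomeSort : Prop := ∀ (N : Int) (arr : List Int), Dom_awseomeSort N arr → Spec_awseomeSort N arr (awseomeSort N arr)

-- ===== LEMMAS AND PROOFS =====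

-- B's comparator, spelled out.
def pvBefore (x y : Int) : Bool :=
  decide (pvG x < pvG y) ||
    (!decide (pvG y < pvG x) &&
      decide ((if pvG x = 0 then -x else 0) < (if pvG y = 0 then -y else 0)))

lemma pvBefore_eq (x y : Int) (h0 : pvG x = 0) (h0' : pvG y = 0) :
    pvBefore x y = decide (y < x) := by
  simp [pvBefore, h0, h0']

lemma pvBefore_false_of_gt (x y : Int) (h : pvG y < pvG x) : pvBefore x y = false := by
  simp [pvBefore]; omega

lemma pvBefore_true_of_lt (x y : Int) (h : pvG x < pvG y) : pvBefore x y = true := by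
  simp [pvBefore]; omega

lemma pvBefore_false_same_pos (x y : Int) (h : pvG x = pvG y) (h0 : pvG x ≠ 0) :
    pvBefore x y = false := by
  simp [pvBefore, h, h ▸ h0]

-- insertBy splits over an append when the inserted element goes after all of l1 …
lemma insertBy_append_right {α : Type} (b : α → α → Bool) (x : α) (l1 l2 : List α)
    (h : ∀ y ∈ l1, b x y = false) :
    PySem.List.insertBy b x (l1 ++ l2) = l1 ++ PySem.List.insertBy b x l2 := by
  induction l1 with
  | nil => simp
  | cons y t ih =>
      have hy : b x y = false := h y (by simp)
      simp [PySem.List.insertBy, hy, ih (fun z hz => h z (by simp [hz]))]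

-- … and when it goes before all of l2.
lemma insertBy_cons_of_all_true {α : Type} (b : α → α → Bool) (x : α) (l : List α)
    (h : ∀ y ∈ l, b x y = true) :
    PySem.List.insertBy b x l = x :: l := by
  cases l with
  | nil => simp [PySem.List.insertBy]
  | cons z t => simp [PySem.List.insertBy, h z (by simp)]

lemma insertBy_append_of_all_false {α : Type} (b : α → α → Bool) (x : α) (l : List α)
    (h : ∀ y ∈ l, b x y = false) :
    PySem.List.insertBy b x l = l ++ [x] := by
  have := insertBy_append_right b x l [] h
  simpa [PySem.List.insertBy] using this

lemma insertBy_append_left {α : Type} (b : α → α → Bool) (x : α) (l1 l2 : List α)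
    (h : ∀ y ∈ l2, b x y = true) :
    PySem.List.insertBy b x (l1 ++ l2) = PySem.List.insertBy b x l1 ++ l2 := by
  induction l1 with
  | nil => simp [insertBy_cons_of_all_true b x l2 h, PySem.List.insertBy]
  | cons y t ih =>
      by_cases hy : b x y = true
      · simp [PySem.List.insertBy, hy]
      · simp only [Bool.not_eq_true] at hy
        simp [PySem.List.insertBy, hy, ih]

lemma insertBy_congr {α : Type} (b b' : α → α → Bool) (x : α) (l : List α)
    (h : ∀ y ∈ l, b x y = b' x y) :
    PySem.List.insertBy b x l = PySem.List.insertBy b' x l := by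
  induction l with
  | nil => rfl
  | cons y t ih =>
      have := h y (by simp)
      simp [PySem.List.insertBy, this, ih (fun z hz => h z (by simp [hz]))]

-- peeling one step off B's fold and off reverse-id sorting
lemma sorted2_append_singleton (xs : List Int) (x : Int) :
    PySem.List.sorted2 (xs ++ [x]) pvG (fun x => if pvG x = 0 then -x else 0) false
      = PySem.List.insertBy pvBefore x
          (PySem.List.sorted2 xs pvG (fun x => if pvG x = 0 then -x else 0) false) := by
  simp only [PySem.List.sorted2, List.foldl_append, List.foldl_cons, List.foldl_nil]
  rfl

lemma sorted_rev_append_singleton (xs : List Int) (x : Int) :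
    PySem.List.sorted (xs ++ [x]) (fun y => y) true
      = PySem.List.insertBy (fun a b => decide (b < a)) x
          (PySem.List.sorted xs (fun y => y) true) := by
  rw [PySem.List.sorted_rev_eq_foldl_insertBy, PySem.List.sorted_rev_eq_foldl_insertBy,
    List.foldl_append]
  simp

-- group membership facts
lemma pvG_mem_filter {xs : List Int} {k : Int} {y : Int}
    (hy : y ∈ xs.filter (fun z => decide (pvG z = k))) : pvG y = k := by
  simp only [List.mem_filter, decide_eq_true_eq] at hy; exact hy.2

lemma mem_sorted_rev_filter {xs : List Int} {y : Int}
    (hy : y ∈ PySem.List.sorted (xs.filter (fun z => decide (pvG z = 0))) (fun y => y) true) :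
    pvG y = 0 := by
  rw [PySem.List.mem_sorted] at hy; exact pvG_mem_filter hy

-- the heart: B's single stable sort produces A's three concatenated groups
lemma sorted2_eq_groups (xs : List Int) :
    PySem.List.sorted2 xs pvG (fun x => if pvG x = 0 then -x else 0) false
      = PySem.List.sorted (xs.filter (fun z => decide (pvG z = 0))) (fun y => y) true
        ++ xs.filter (fun z => decide (pvG z = 1))
        ++ xs.filter (fun z => decide (pvG z = 2)) := by
  induction xs using List.reverseRecOn with
  | nil => simp [PySem.List.sorted2, PySem.List.sorted]
  | append_singleton xs x ih =>
      rw [sorted2_append_singleton, ih]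
      have hG : pvG x = 0 ∨ pvG x = 1 ∨ pvG x = 2 := by
        unfold pvG; split_ifs <;> simp
      rcases hG with h | h | h
      · -- even, divisible by 5: insert into the first (descending-sorted) block
        rw [List.append_assoc,
          insertBy_append_left pvBefore x _ _ (by
            intro y hy
            rcases List.mem_append.mp hy with hy | hy
            · exact pvBefore_true_of_lt x y (by rw [h, pvG_mem_filter hy]; norm_num)
            · exact pvBefore_true_of_lt x y (by rw [h, pvG_mem_filter hy]; norm_num)),
          insertBy_congr pvBefore (fun a b => decide (b < a)) x _ (fun y hy =>
            pvBefore_eq x y h (mem_sorted_rev_filter hy)),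
          ← sorted_rev_append_singleton]
        simp [List.filter_append, h, List.append_assoc]
      · -- even, not divisible by 5: goes to the end of the middle block
        rw [List.append_assoc,
          insertBy_append_right pvBefore x _ _ (fun y hy =>
            pvBefore_false_of_gt x y (by rw [h, mem_sorted_rev_filter hy]; norm_num)),
          insertBy_append_right pvBefore x _ _ (fun y hy =>
            pvBefore_false_same_pos x y (by rw [h, pvG_mem_filter hy]) (by rw [h]; norm_num)),
          insertBy_cons_of_all_true pvBefore x _ (fun y hy =>
            pvBefore_true_of_lt x y (by rw [h, pvG_mem_filter hy]; norm_num))]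
        simp [List.filter_append, h]
      · -- odd: goes to the very end
        rw [List.append_assoc,
          insertBy_append_right pvBefore x _ _ (fun y hy =>
            pvBefore_false_of_gt x y (by rw [h, mem_sorted_rev_filter hy]; norm_num)),
          insertBy_append_right pvBefore x _ _ (fun y hy =>
            pvBefore_false_of_gt x y (by rw [h, pvG_mem_filter hy]; norm_num)),
          insertBy_append_of_all_false pvBefore x _ (fun y hy =>
            pvBefore_false_same_pos x y (by rw [h, pvG_mem_filter hy]) (by rw [h]; norm_num))]
        simp [List.filter_append, h]

-- A's two-accumulator partition loops as filters
lemma pair_loop_snd (l : List Int) (q : Int → Prop) [DecidablePred q] (a b : List Int) :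
    l.foldl (fun (s : List Int × List Int) x =>
        if q x then (s.1, s.2 ++ [x]) else (s.1 ++ [x], s.2)) (a, b)
      = (a ++ l.filter (fun x => !decide (q x)), b ++ l.filter (fun x => decide (q x))) := by
  induction l generalizing a b with
  | nil => simp
  | cons x t ih => by_cases hx : q x <;> simp [hx, ih]

lemma pair_loop_fst (l : List Int) (q : Int → Prop) [DecidablePred q] (a b : List Int) :
    l.foldl (fun (s : List Int × List Int) x =>
        if q x then (s.1 ++ [x], s.2) else (s.1, s.2 ++ [x])) (a, b)
      = (a ++ l.filter (fun x => decide (q x)), b ++ l.filter (fun x => !decide (q x))) := by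
  induction l generalizing a b with
  | nil => simp
  | cons x t ih => by_cases hx : q x <;> simp [hx, ih]

-- proof-only abbreviations for A's two index loops (definitional copies, used to state hA)
def pvL1 (arr : List Int) : List Int × List Int :=
  (PySem.List.pyRange 0 (PySem.List.len arr)).foldl
    (fun (s : List Int × List Int) i =>
      if PySem.Int.mod (PySem.List.pyGetD arr i 0) 2 ≠ 0 then
        (s.1, s.2 ++ [PySem.List.pyGetD arr i 0])
      else
        (s.1 ++ [PySem.List.pyGetD arr i 0], s.2)) ([], [])

def pvL2 (arrev : List Int) : List Int × List Int :=
  (PySem.List.pyRange 0 (PySem.List.len arrev)).foldl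
    (fun (s : List Int × List Int) j =>
      if PySem.Int.mod (PySem.List.pyGetD arrev j 0) 5 = 0 then
        (s.1 ++ [PySem.List.pyGetD arrev j 0], s.2)
      else
        (s.1, s.2 ++ [PySem.List.pyGetD arrev j 0])) ([], [])

lemma pvL1_eq (arr : List Int) :
    pvL1 arr = (arr.filter (fun x => !decide (PySem.Int.mod x 2 ≠ 0)),
                arr.filter (fun x => decide (PySem.Int.mod x 2 ≠ 0))) := by
  unfold pvL1
  rw [PySem.List.foldl_pyRange_zero_pyGetD arr 0
        (fun (s : List Int × List Int) x =>
          if PySem.Int.mod x 2 ≠ 0 then (s.1, s.2 ++ [x]) else (s.1 ++ [x], s.2)) ([], []),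
      pair_loop_snd arr (fun x => PySem.Int.mod x 2 ≠ 0) [] []]
  simp

lemma pvL2_eq (l : List Int) :
    pvL2 l = (l.filter (fun x => decide (PySem.Int.mod x 5 = 0)),
              l.filter (fun x => !decide (PySem.Int.mod x 5 = 0))) := by
  unfold pvL2
  rw [PySem.List.foldl_pyRange_zero_pyGetD l 0
        (fun (s : List Int × List Int) x =>
          if PySem.Int.mod x 5 = 0 then (s.1 ++ [x], s.2) else (s.1, s.2 ++ [x])) ([], []),
      pair_loop_fst l (fun x => PySem.Int.mod x 5 = 0) [] []]
  simp

-- ===== VERDICT (by name: the statement is the Claim_ definition above) =====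
theorem awseomeSort_spec : Claim_equal_awseomeSort := by
  intro N arr _
  show awseomeSort N arr = awseomeSort_alt N arr
  have hA : awseomeSort N arr =
      (PySem.List.sorted (pvL2 (pvL1 arr).1).1 (fun x => x) true ++ (pvL2 (pvL1 arr).1).2)
        ++ (pvL1 arr).2 := rfl
  rw [hA, pvL1_eq, pvL2_eq]
  simp only [List.filter_filter]
  unfold awseomeSort_alt
  rw [sorted2_eq_groups arr]
  have e0 : arr.filter (fun x => decide (PySem.Int.mod x 5 = 0) && !decide (PySem.Int.mod x 2 ≠ 0))
      = arr.filter (fun z => decide (pvG z = 0)) := by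
    apply List.filter_congr; intro x _
    by_cases h2 : (2:Int) ∣ x <;> by_cases h5 : (5:Int) ∣ x <;>
      simp [pvG, h2, h5]
  have e1 : arr.filter (fun x => !decide (PySem.Int.mod x 5 = 0) && !decide (PySem.Int.mod x 2 ≠ 0))
      = arr.filter (fun z => decide (pvG z = 1)) := by
    apply List.filter_congr; intro x _
    by_cases h2 : (2:Int) ∣ x <;> by_cases h5 : (5:Int) ∣ x <;>
      simp [pvG, h2, h5]
  have e2 : arr.filter (fun x => decide (PySem.Int.mod x 2 ≠ 0))
      = arr.filter (fun z => decide (pvG z = 2)) := by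
    apply List.filter_congr; intro x _
    by_cases h2 : (2:Int) ∣ x <;> by_cases h5 : (5:Int) ∣ x <;>
      simp [pvG, h2, h5]
  rw [e0, e1, e2, List.append_assoc]
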